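-- pv_equiv track=rewrite | github.com/jigsaw007/fplnepalwebapp | app.py | get_best_and_worst_gameweeks
-- ===== SOURCE A (Python) =====
-- def get_best_and_worst_gameweeks(gameweek_history):
--     current_gameweeks = gameweek_history['current']
--     best_gameweeks = []
--     worst_gameweeks = []
--     max_points = max(gameweek['points'] for gameweek in current_gameweeks)
--     min_points = min(gameweek['points'] for gameweek in current_gameweeks)
--
--     for gameweek in current_gameweeks:
--         if (gameweek['points'] == max_points):
--             best_gameweeks.append(gameweek)
--         if (gameweek['points'] == min_points):
--             worst_gameweeks.append(gameweek)
--
--     return best_gameweeks, worst_gameweeks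
-- ===== SOURCE B (Python) =====
-- def get_best_and_worst_gameweeks(gameweek_history):
--     groups = {}
--     for gameweek in gameweek_history['current']:
--         points = gameweek['points']
--         groups[points] = groups.get(points, []) + [gameweek]
--     return groups[max(groups)], groups[min(groups)]
-- ===== Notes on version B (the rewrite author's own statement) =====
-- stated objective: simpler
-- what changed: Replaces the two generator reduction passes plus the collecting loop with a single pass that groups gameweeks into a dict keyed by points, then returns the groups at the max and min key.
import Mathlib
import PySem

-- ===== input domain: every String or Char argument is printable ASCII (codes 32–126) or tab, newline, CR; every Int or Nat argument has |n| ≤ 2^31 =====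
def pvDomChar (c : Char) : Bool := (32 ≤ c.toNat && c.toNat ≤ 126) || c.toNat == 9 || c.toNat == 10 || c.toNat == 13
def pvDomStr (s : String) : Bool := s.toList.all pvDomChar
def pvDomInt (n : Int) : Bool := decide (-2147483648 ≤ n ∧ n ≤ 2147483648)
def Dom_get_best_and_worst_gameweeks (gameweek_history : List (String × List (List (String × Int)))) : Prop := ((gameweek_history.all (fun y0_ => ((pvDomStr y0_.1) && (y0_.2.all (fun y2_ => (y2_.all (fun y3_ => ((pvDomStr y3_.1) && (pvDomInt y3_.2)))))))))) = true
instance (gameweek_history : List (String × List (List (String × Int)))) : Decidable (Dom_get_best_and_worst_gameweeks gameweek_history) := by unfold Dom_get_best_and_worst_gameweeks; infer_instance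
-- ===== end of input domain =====

-- B replaces A's two reduction passes plus collecting loop with one dict-building pass grouping
-- gameweeks by points, then looks up the max and min key (objective: simpler).

-- ===== PORT A =====
-- gw['points'] : first match in the association list, 0 never used (Pre_ guarantees the key exists)
def pvPoints (gw : List (String × Int)) : Int := (gw.lookup "points").getD 0

def get_best_and_worst_gameweeks (gameweek_history : List (String × List (List (String × Int)))) : (List (List (String × Int))) × (List (List (String × Int))) :=
  match gameweek_history.lookup "current" with
  | none => ([], [])  -- KeyError in Python; excluded by Pre_
  | some current_gameweeks =>
    match PySem.List.max? (current_gameweeks.map pvPoints) (fun x => x),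
          PySem.List.min? (current_gameweeks.map pvPoints) (fun x => x) with
    | some max_points, some min_points =>
      -- the for-loop appending to best_gameweeks / worst_gameweeks
      current_gameweeks.foldl
        (fun st gameweek =>
          (if pvPoints gameweek == max_points then st.1 ++ [gameweek] else st.1,
           if pvPoints gameweek == min_points then st.2 ++ [gameweek] else st.2))
        ([], [])
    | _, _ => ([], [])  -- ValueError of max()/min() on empty; excluded by Pre_

-- ===== PORT B =====
-- gw['points'] in Source B (own copy: the ports share no definitions)
def pvPointsB (gw : List (String × Int)) : Int := (gw.lookup "points").getD 0

def get_best_and_worst_gameweeks_alt (gameweek_history : List (String × List (List (String × Int)))) : (List (List (String × Int))) × (List (List (String × Int))) :=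
  (gameweek_history.lookup "current").elim
    ([], [])  -- KeyError in Python; excluded by Pre_
    (fun current =>
      -- groups[p] = groups.get(p, []) + [gameweek]
      let groups := current.foldl
        (fun d gameweek => d.modify (pvPointsB gameweek) [] (· ++ [gameweek]))
        PySem.Dict.empty
      ((PySem.List.max? groups.keys (fun k => k)).elim ([], []) (fun mx =>
        (PySem.List.min? groups.keys (fun k => k)).elim ([], []) (fun mn =>
          (groups.getD mx [], groups.getD mn [])))))  -- .elim none = ValueError of max()/min() on the empty dict; excluded by Pre_

-- ===== PRECONDITION & SPEC =====
-- Pre_ excludes exactly the inputs where A raises: a missing 'current' key (KeyError), an empty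
-- 'current' list (ValueError from max()), or a gameweek without a 'points' key (KeyError).
def pvPreB (gameweek_history : List (String × List (List (String × Int)))) : Bool :=
  match gameweek_history.lookup "current" with
  | none => false
  | some cur => !cur.isEmpty && cur.all (fun gw => (gw.lookup "points").isSome)
def Pre_get_best_and_worst_gameweeks (gameweek_history : List (String × List (List (String × Int)))) : Prop :=
  pvPreB gameweek_history = true
instance (gameweek_history : List (String × List (List (String × Int)))) : Decidable (Pre_get_best_and_worst_gameweeks gameweek_history) := by unfold Pre_get_best_and_worst_gameweeks; infer_instance

def pvWitness_get_best_and_worst_gameweeks : (List (String × List (List (String × Int)))) :=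
  [("current", [[("points", 3)], [("points", 1)], [("points", 3)]])]

def Spec_get_best_and_worst_gameweeks (gameweek_history : List (String × List (List (String × Int)))) (out : (List (List (String × Int))) × (List (List (String × Int)))) : Prop := out = get_best_and_worst_gameweeks_alt gameweek_history
instance (gameweek_history : List (String × List (List (String × Int)))) (out : (List (List (String × Int))) × (List (List (String × Int)))) : Decidable (Spec_get_best_and_worst_gameweeks gameweek_history out) := by unfold Spec_get_best_and_worst_gameweeks; infer_instance

-- ===== CLAIM (what is proved, stated in full; the proofs are below) =====
def Claim_equal_get_best_and_worst_gameweeks : Prop := ∀ (gameweek_history : List (String × List (List (String × Int)))), Dom_get_best_and_worst_gameweeks gameweek_history → Pre_get_best_and_worst_gameweeks gameweek_history → Spec_get_best_and_worst_gameweeks gameweek_history (get_best_and_worst_gameweeks gameweek_history)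

-- ===== LEMMAS AND PROOFS =====

-- the two ports' own copies of gw['points'] agree
theorem pvPointsB_eq : pvPointsB = pvPoints := rfl

-- keys of B's grouping dict are exactly the points values occurring in the list
theorem pv_mem_keys_build (cur : List (List (String × Int)))
    (d : PySem.Dict Int (List (List (String × Int)))) (k : Int) :
    k ∈ (cur.foldl (fun d gw => d.modify (pvPoints gw) [] (· ++ [gw])) d).keys ↔
      k ∈ d.keys ∨ k ∈ cur.map pvPoints := by
  induction cur generalizing d with
  | nil => simp
  | cons gw t ih =>
    simp only [List.foldl_cons, List.map_cons, List.mem_cons, ih,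
      PySem.Dict.keys_modify, PySem.Dict.mem_keys_insert]
    tauto

-- lookup in B's grouping dict is A's filter
theorem pv_getD_build (cur : List (List (String × Int))) (k : Int) :
    (cur.foldl (fun d gw => d.modify (pvPoints gw) [] (· ++ [gw]))
        (PySem.Dict.empty : PySem.Dict Int (List (List (String × Int))))).getD k [] =
      cur.filter (fun gw => pvPoints gw == k) := by
  have h1 : cur.foldl (fun d gw => d.modify (pvPoints gw) [] (· ++ [gw]))
      (PySem.Dict.empty : PySem.Dict Int (List (List (String × Int)))) =
      (cur.map (fun gw => (pvPoints gw, gw))).foldl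
        (fun d p => d.modify p.1 [] (· ++ [p.2])) PySem.Dict.empty := by
    rw [List.foldl_map]
  rw [h1, PySem.Dict.getD_foldl_modify_append, List.filter_map, List.map_map]
  simp [Function.comp_def]

-- two Int lists with the same members have the same max()/min()
theorem pv_max?_congr (xs ys : List Int) (hm : ∀ k, k ∈ xs ↔ k ∈ ys) :
    PySem.List.max? xs (fun x => x) = PySem.List.max? ys (fun x => x) := by
  cases hx : PySem.List.max? xs (fun x => x) with
  | none =>
    rw [PySem.List.max?_eq_none_iff] at hx
    subst hx
    cases hy : PySem.List.max? ys (fun x => x) with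
    | none => rfl
    | some b =>
      have := PySem.List.max?_mem hy
      exact absurd ((hm b).mpr this) List.not_mem_nil
  | some a =>
    cases hy : PySem.List.max? ys (fun x => x) with
    | none =>
      rw [PySem.List.max?_eq_none_iff] at hy
      subst hy
      have := PySem.List.max?_mem hx
      exact absurd ((hm a).mp this) List.not_mem_nil
    | some b =>
      have hab : a ≤ b := PySem.List.max?_isMax hy a ((hm a).mp (PySem.List.max?_mem hx))
      have hba : b ≤ a := PySem.List.max?_isMax hx b ((hm b).mpr (PySem.List.max?_mem hy))
      exact congrArg some (le_antisymm hab hba)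

theorem pv_min?_congr (xs ys : List Int) (hm : ∀ k, k ∈ xs ↔ k ∈ ys) :
    PySem.List.min? xs (fun x => x) = PySem.List.min? ys (fun x => x) := by
  cases hx : PySem.List.min? xs (fun x => x) with
  | none =>
    rw [PySem.List.min?_eq_none_iff] at hx
    subst hx
    cases hy : PySem.List.min? ys (fun x => x) with
    | none => rfl
    | some b =>
      have := PySem.List.min?_mem hy
      exact absurd ((hm b).mpr this) List.not_mem_nil
  | some a =>
    cases hy : PySem.List.min? ys (fun x => x) with
    | none =>
      rw [PySem.List.min?_eq_none_iff] at hy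
      subst hy
      have := PySem.List.min?_mem hx
      exact absurd ((hm a).mp this) List.not_mem_nil
    | some b =>
      have hab : b ≤ a := PySem.List.min?_isMin hy a ((hm a).mp (PySem.List.min?_mem hx))
      have hba : a ≤ b := PySem.List.min?_isMin hx b ((hm b).mpr (PySem.List.min?_mem hy))
      exact congrArg some (le_antisymm hba hab)

-- ===== VERDICT (by name: the statement is the Claim_ definition above) =====
theorem get_best_and_worst_gameweeks_spec : Claim_equal_get_best_and_worst_gameweeks := by
  intro h _ hpre
  unfold Pre_get_best_and_worst_gameweeks at hpre
  unfold Spec_get_best_and_worst_gameweeks get_best_and_worst_gameweeks get_best_and_worst_gameweeks_alt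
  cases hcur : h.lookup "current" with
  | none => rfl
  | some cur =>
    unfold pvPreB at hpre
    rw [hcur] at hpre
    have hne : cur ≠ [] := by
      intro hc
      subst hc
      simp at hpre
    -- members of groups.keys = members of cur.map pvPoints
    have hkeys : ∀ k, k ∈ (cur.foldl (fun d gw => d.modify (pvPoints gw) [] (· ++ [gw]))
        (PySem.Dict.empty : PySem.Dict Int (List (List (String × Int))))).keys ↔
        k ∈ cur.map pvPoints := by
      intro k
      rw [pv_mem_keys_build]
      simp [PySem.Dict.empty]
    have hmax := pv_max?_congr _ _ hkeys
    have hmin := pv_min?_congr _ _ hkeys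
    -- max/min of a nonempty list is some
    cases hmx : PySem.List.max? (cur.map pvPoints) (fun x => x) with
    | none =>
      rw [PySem.List.max?_eq_none_iff] at hmx
      exact absurd (List.map_eq_nil_iff.mp hmx) hne
    | some maxp =>
      cases hmn : PySem.List.min? (cur.map pvPoints) (fun x => x) with
      | none =>
        rw [PySem.List.min?_eq_none_iff] at hmn
        exact absurd (List.map_eq_nil_iff.mp hmn) hne
      | some minp =>
        rw [hmx] at hmax
        rw [hmn] at hmin
        simp only [pvPointsB_eq, Option.elim, hmax, hmin, hmx, hmn, pv_getD_build]
        rw [PySem.List.foldl_prod_mk (fun s gw => if pvPoints gw == maxp then s ++ [gw] else s)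
            (fun s gw => if pvPoints gw == minp then s ++ [gw] else s) cur [] []]
        simp only [PySem.List.foldl_append_if_eq_filter, List.nil_append]
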